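-- pv_equiv track=rewrite | github.com/crmilsap/SEC-Historical-Data-Miner | SECDataMiner.py | getNotableIndices
-- ===== SOURCE A (Python) =====
-- def getNotableIndices(row, num):
--     indices = []
--     for index, entry in reversed(list(enumerate(row))):
--         if "" != entry and "[" not in entry:
--             indices.append(index)
--             if len(indices) == num:
--                 break
--     return indices
-- ===== SOURCE B (Python) =====
-- def getNotableIndices(row, num):
--     valid = [i for i, e in enumerate(row) if e != "" and "[" not in e]
--     if num > 0:
--         valid = valid[-num:]
--     return valid[::-1]
-- ===== Notes on version B (the rewrite author's own statement) =====
-- stated objective: simpler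
-- what changed: Replaces the reverse scan with an early-exit break by a forward comprehension of all valid indices followed by a tail slice and reversal.
import Mathlib
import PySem

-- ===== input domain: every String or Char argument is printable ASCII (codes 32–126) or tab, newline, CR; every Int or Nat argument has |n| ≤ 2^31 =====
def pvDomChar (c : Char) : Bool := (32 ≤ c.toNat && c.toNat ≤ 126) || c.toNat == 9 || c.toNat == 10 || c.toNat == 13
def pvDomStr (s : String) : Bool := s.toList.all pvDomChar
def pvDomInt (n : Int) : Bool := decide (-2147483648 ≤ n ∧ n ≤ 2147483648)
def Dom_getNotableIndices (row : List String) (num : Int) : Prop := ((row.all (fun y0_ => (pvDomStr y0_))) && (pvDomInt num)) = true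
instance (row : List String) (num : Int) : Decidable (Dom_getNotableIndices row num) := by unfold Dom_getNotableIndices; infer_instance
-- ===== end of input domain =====

-- B replaces A's reverse scan with early break by a forward comprehension, a tail slice and a reversal (objective: simpler).

-- ===== PORT A =====
-- the 'for … in reversed(list(enumerate(row)))' loop with its early 'break', as structural recursion
def pvLoopA (num : Int) : List (Int × String) → List Int → List Int
  | [], indices => indices
  | (index, entry) :: rest, indices =>
    if entry != "" && !(PySem.Str.isIn "[" entry) then
      if ((indices ++ [index]).length : Int) = num then indices ++ [index]
      else pvLoopA num rest (indices ++ [index])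
    else pvLoopA num rest indices

def getNotableIndices (row : List String) (num : Int) : List Int :=
  pvLoopA num (PySem.List.enumerate row 0).reverse []

-- ===== PORT B =====
def getNotableIndices_alt (row : List String) (num : Int) : List Int :=
  let valid : List Int :=
    ((PySem.List.enumerate row 0).filter
      (fun p => p.2 != "" && !(PySem.Str.isIn "[" p.2))).map Prod.fst
  let valid := if num > 0 then PySem.List.slice valid (some (-num)) none else valid
  (PySem.List.slice? valid none none (-1)).getD []

-- ===== PRECONDITION & SPEC =====
def Spec_getNotableIndices (row : List String) (num : Int) (out : List Int) : Prop := out = getNotableIndices_alt row num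
instance (row : List String) (num : Int) (out : List Int) : Decidable (Spec_getNotableIndices row num out) := by unfold Spec_getNotableIndices; infer_instance

-- ===== CLAIM (what is proved, stated in full; the proofs are below) =====
def Claim_equal_getNotableIndices : Prop := ∀ (row : List String) (num : Int), Dom_getNotableIndices row num → Spec_getNotableIndices row num (getNotableIndices row num)

-- ===== LEMMAS AND PROOFS =====

def pvP : Int × String → Bool := fun q => q.2 != "" && !(PySem.Str.isIn "[" q.2)

def pvFiltered (l : List (Int × String)) : List Int := (l.filter pvP).map Prod.fst

lemma pvLoopA_cons (num i : Int) (e : String) (rest : List (Int × String)) (acc : List Int) :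
    pvLoopA num ((i, e) :: rest) acc =
      if pvP (i, e) then
        (if ((acc ++ [i]).length : Int) = num then acc ++ [i] else pvLoopA num rest (acc ++ [i]))
      else pvLoopA num rest acc := rfl

lemma pvLoopA_nonpos (num : Int) (hnum : num ≤ 0) :
    ∀ (l : List (Int × String)) (acc : List Int),
      pvLoopA num l acc = acc ++ pvFiltered l := by
  intro l
  induction l with
  | nil => intro acc; simp [pvLoopA, pvFiltered]
  | cons q rest ih =>
    intro acc
    obtain ⟨i, e⟩ := q
    rw [pvLoopA_cons]
    by_cases hp : pvP (i, e) = true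
    · have hne : ¬ (((acc ++ [i]).length : Int) = num) := by
        simp only [List.length_append, List.length_cons, List.length_nil]
        omega
      rw [if_pos hp, if_neg hne, ih]
      simp [pvFiltered, hp]
    · rw [if_neg hp, ih]
      simp [pvFiltered, Bool.of_not_eq_true hp]

lemma pvLoopA_pos (num : Int) (hnum : 0 < num) :
    ∀ (l : List (Int × String)) (acc : List Int), (acc.length : Int) < num →
      pvLoopA num l acc = acc ++ (pvFiltered l).take (num.toNat - acc.length) := by
  intro l
  induction l with
  | nil => intro acc _; simp [pvLoopA, pvFiltered]
  | cons q rest ih =>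
    intro acc hacc
    obtain ⟨i, e⟩ := q
    rw [pvLoopA_cons]
    by_cases hp : pvP (i, e) = true
    · rw [if_pos hp]
      by_cases hbr : (((acc ++ [i]).length : Int) = num)
      · have h1 : num.toNat - acc.length = 1 := by
          simp only [List.length_append, List.length_cons, List.length_nil] at hbr
          omega
        rw [if_pos hbr, h1]
        simp [pvFiltered, hp]
      · have hlt : (((acc ++ [i]).length : Nat) : Int) < num := by
          simp only [List.length_append, List.length_cons, List.length_nil] at hbr ⊢
          push_cast at hbr ⊢; omega
        have h3 : 1 ≤ num.toNat - acc.length := by omega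
        rw [if_neg hbr, ih (acc ++ [i]) hlt]
        have h2 : num.toNat - (acc ++ [i]).length = num.toNat - acc.length - 1 := by
          simp only [List.length_append, List.length_cons, List.length_nil]; omega
        rw [h2, show num.toNat - acc.length = (num.toNat - acc.length - 1) + 1 from by omega]
        simp [pvFiltered, hp]
    · rw [if_neg hp, ih acc hacc]
      simp [pvFiltered, Bool.of_not_eq_true hp]

lemma pvFiltered_reverse (l : List (Int × String)) :
    pvFiltered l.reverse = (pvFiltered l).reverse := by
  simp [pvFiltered, List.filter_reverse]

lemma pv_rev_drop_take (xs : List Int) (n : Nat) :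
    (xs.drop (xs.length - n)).reverse = xs.reverse.take n := by
  rw [List.reverse_drop]
  have h : xs.length - (xs.length - n) = min n xs.length := by omega
  rw [h]
  apply List.ext_getElem
  · simp
  · intro k hk1 hk2; simp

-- ===== VERDICT (by name: the statement is the Claim_ definition above) =====
theorem getNotableIndices_spec : Claim_equal_getNotableIndices := by
  intro row num _
  unfold Spec_getNotableIndices getNotableIndices
  simp only [getNotableIndices_alt]
  rw [PySem.List.slice?_none_none_neg_one]
  simp only [Option.getD_some]
  have hfv : ((PySem.List.enumerate row 0).filter
      (fun p => p.2 != "" && !(PySem.Str.isIn "[" p.2))).map Prod.fst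
      = pvFiltered (PySem.List.enumerate row 0) := rfl
  rw [hfv]
  set valid := pvFiltered (PySem.List.enumerate row 0) with hv
  by_cases hnum : 0 < num
  · have h1 := pvLoopA_pos num hnum (PySem.List.enumerate row 0).reverse [] (by simpa using hnum)
    rw [h1, pvFiltered_reverse]
    have hslice : PySem.List.slice valid (some (-num)) none = valid.drop (valid.length - num.toNat) := by
      rw [show -num = -((num.toNat : Nat) : Int) from by omega,
        PySem.List.slice_from_neg_natCast _ _ (by omega)]
    rw [if_pos hnum, hslice, ← hv]
    simp only [List.nil_append]
    exact (pv_rev_drop_take valid num.toNat).symm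
  · have h1 := pvLoopA_nonpos num (by omega) (PySem.List.enumerate row 0).reverse []
    rw [h1, pvFiltered_reverse, if_neg hnum, ← hv]
    simp
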